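-- pv_equiv track=rewrite | github.com/mihailruskevich/rosalind | bioinformatics_textbook_track/mismatches_frequent_words/mismatches_words.py | matches_map
-- ===== SOURCE A (Python) =====
-- from itertools import product
--
-- def k_mer_list(k):
--     return map(''.join, product('ACGT', repeat=k))
--
-- def matches(s, mer, d, i):
--     return len([1 for x, y in zip(s[i: i + len(mer)], mer) if x != y]) <= d
--
-- def matches_map(s, k, d):
--     k_mers = k_mer_list(k)
--     count_map = {}
--     for k_mer in k_mers:
--         for i in range(0, len(s) - k + 1):
--             if matches(s, k_mer, d, i):
--                 if k_mer in count_map: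
--                     count_map[k_mer] += 1
--                 else:
--                     count_map[k_mer] = 1
--     return count_map
-- ===== SOURCE B (Python) =====
-- def neighbors(t, d):
--     # all strings over 'ACGT' of len(t) whose hamming distance to t is <= d
--     if d < 0:
--         return []
--     if not t:
--         return ['']
--     res = []
--     for c in 'ACGT':
--         cost = 0 if c == t[0] else 1
--         for tail in neighbors(t[1:], d - cost):
--             res.append(c + tail)
--     return res
--
-- def matches_map(s, k, d):
--     counts = {}
--     for i in range(len(s) - k + 1):
--         for u in neighbors(s[i:i + k], d):
--             counts[u] = counts.get(u, 0) + 1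
--     return {u: counts[u] for u in sorted(counts)}
-- ===== Notes on version B (the rewrite author's own statement) =====
-- stated objective: alternative
-- what changed: A scans all 4^k k-mers and tests each against every window of s; B makes one pass over the windows, generates each window's d-neighborhood over ACGT into a counter, and emits the keys in sorted (= A's insertion) order; intended as faster for small d (O(n*k*N_d) vs O(4^k*n*k)) but a timing run measured only 1.43x at the largest size both finished, so no speed is claimed.
import Mathlib
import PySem

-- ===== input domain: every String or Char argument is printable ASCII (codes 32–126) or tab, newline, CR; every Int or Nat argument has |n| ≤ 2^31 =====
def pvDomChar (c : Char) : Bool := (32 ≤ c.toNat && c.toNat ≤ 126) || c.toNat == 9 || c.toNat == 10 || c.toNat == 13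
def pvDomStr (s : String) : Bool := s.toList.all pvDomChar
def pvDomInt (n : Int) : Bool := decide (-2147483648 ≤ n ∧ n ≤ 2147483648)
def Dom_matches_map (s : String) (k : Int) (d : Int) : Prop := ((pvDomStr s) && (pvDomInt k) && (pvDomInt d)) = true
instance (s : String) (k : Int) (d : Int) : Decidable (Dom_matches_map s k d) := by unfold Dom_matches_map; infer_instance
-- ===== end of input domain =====

-- B replaces A's scan over all 4^k k-mers by one pass over the text that expands each
-- window's d-neighborhood into a counter, then emits the keys in sorted (= A's insertion)
-- order (objective: alternative — a genuinely different traversal; no speed is claimed).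

-- ===== PORT A =====
-- ''.join over product('ACGT', repeat=k), in itertools.product order
def pyKmerList : Nat → List (List Char)
  | 0 => [[]]
  | n+1 => (['A','C','G','T'].map (fun c => (pyKmerList n).map (fun t => c :: t))).flatten

-- matches(s, mer, d, i) = len([1 for x, y in zip(s[i:i+len(mer)], mer) if x != y]) <= d
def matchesA (s : List Char) (mer : List Char) (d : Int) (i : Int) : Bool :=
  decide ((((PySem.List.slice s (some i) (some (i + (mer.length : Int)))).zip mer).countP
      (fun p => p.1 != p.2) : Int) ≤ d)

def matches_map (s : String) (k : Int) (d : Int) : List (String × Int) :=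
  let k_mers := pyKmerList k.toNat
  let count_map : PySem.Dict (List Char) Int :=
    k_mers.foldl (fun cm k_mer =>
      (PySem.List.pyRange 0 (PySem.Str.len s - k + 1) 1).foldl (fun cm i =>
        if matchesA s.toList k_mer d i then
          if cm.contains k_mer then cm.insert k_mer (cm.getD k_mer 0 + 1)
          else cm.insert k_mer 1
        else cm) cm) PySem.Dict.empty
  count_map.items.map (fun p => (String.ofList p.1, p.2))

-- ===== PORT B =====
-- all ACGT strings of len(t) within hamming distance d of t
def neighborsB : List Char → Int → List (List Char)
  | t, d =>
    if d < 0 then []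
    else
      match t with
      | [] => [[]]
      | c0 :: rest =>
        (['A','C','G','T'].map (fun c =>
          (neighborsB rest (d - (if c == c0 then 0 else 1))).map (fun tail => c :: tail))).flatten

def matches_map_alt (s : String) (k : Int) (d : Int) : List (String × Int) :=
  let counts : PySem.Dict (List Char) Int :=
    (PySem.List.pyRange 0 (PySem.Str.len s - k + 1) 1).foldl (fun cm i =>
      (neighborsB (PySem.List.slice s.toList (some i) (some (i + k))) d).foldl
        (fun cm u => cm.insert u (cm.getD u 0 + 1)) cm) PySem.Dict.empty
  (PySem.List.sorted counts.keys (fun u => u) false).map (fun u => (String.ofList u, counts.getD u 0))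

-- ===== PRECONDITION & SPEC =====
-- Pre_ excludes k < 0, on which Python A raises ValueError (product(..., repeat=k)).
def Pre_matches_map (s : String) (k : Int) (d : Int) : Prop := 0 ≤ k
instance (s : String) (k : Int) (d : Int) : Decidable (Pre_matches_map s k d) := by unfold Pre_matches_map; infer_instance
def pvWitness_matches_map : String × Int × Int := ("AC", 1, 0)

def Spec_matches_map (s : String) (k : Int) (d : Int) (out : List (String × Int)) : Prop := out = matches_map_alt s k d
instance (s : String) (k : Int) (d : Int) (out : List (String × Int)) : Decidable (Spec_matches_map s k d out) := by unfold Spec_matches_map; infer_instance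

-- ===== CLAIM (what is proved, stated in full; the proofs are below) =====
def Claim_equal_matches_map : Prop := ∀ (s : String) (k : Int) (d : Int), Dom_matches_map s k d → Pre_matches_map s k d → Spec_matches_map s k d (matches_map s k d)

-- ===== LEMMAS AND PROOFS =====

theorem foldInc (u : List Char) (p : Int → Bool) (r : List Int) :
    ∀ (cm : PySem.Dict (List Char) Int),
    r.foldl (fun cm i => if p i then cm.insert u (cm.getD u 0 + 1) else cm) cm
      = if r.countP p = 0 then cm else cm.insert u (cm.getD u 0 + (r.countP p : Int)) := by
  induction r with
  | nil => intro cm; simp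
  | cons i r ih =>
    intro cm
    by_cases hp : p i
    · simp only [List.foldl_cons, hp, if_true, List.countP_cons]
      rw [ih]
      by_cases hc : r.countP p = 0
      · rw [hc]; simp [hp]
      · have h2 : ¬ (r.countP p + (if p i = true then 1 else 0) = 0) := by simp [hp]
        simp only [hc, if_false, PySem.Dict.getD_insert_self, PySem.Dict.insert_insert_self,
          h2, if_false, hp, if_true]
        congr 1
        push_cast
        ring
    · simp only [List.foldl_cons, hp, if_false, List.countP_cons]
      rw [ih]
      simp [hp]

theorem stepA_eq (u : List Char) (p : Int → Bool) :
    (fun (cm : PySem.Dict (List Char) Int) (i : Int) =>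
      if p i then (if cm.contains u then cm.insert u (cm.getD u 0 + 1) else cm.insert u 1) else cm)
    = (fun cm i => if p i then cm.insert u (cm.getD u 0 + 1) else cm) := by
  funext cm i
  by_cases hp : p i
  · simp only [hp, if_true]
    by_cases hc : cm.contains u
    · simp [hc]
    · have : cm.getD u 0 = 0 := by
        rw [PySem.Dict.getD_of_not_contains]
        simpa using hc
      simp [hc, this]
  · simp [hp]
def mismN (u t : List Char) : Nat := (u.zip t).countP (fun p => p.1 != p.2)

theorem foldOuter (s : List Char) (d : Int) (r : List Int) (ks : List (List Char)) :
    ∀ (cm : PySem.Dict (List Char) Int), ks.Nodup → (∀ u ∈ ks, cm.contains u = false) →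
    (ks.foldl (fun cm u => r.foldl (fun cm i =>
        if matchesA s u d i then
          (if cm.contains u then cm.insert u (cm.getD u 0 + 1) else cm.insert u 1)
        else cm) cm) cm).items
    = cm.items ++ ks.filterMap (fun u =>
        if r.countP (fun i => matchesA s u d i) = 0 then none
        else some (u, (r.countP (fun i => matchesA s u d i) : Int))) := by
  induction ks with
  | nil => intro cm _ _; simp
  | cons u ks ih =>
    intro cm hnd hfresh
    have hstep : (fun (cm : PySem.Dict (List Char) Int) (i : Int) =>
        if matchesA s u d i then
          (if cm.contains u then cm.insert u (cm.getD u 0 + 1) else cm.insert u 1)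
        else cm) = (fun cm i => if matchesA s u d i then cm.insert u (cm.getD u 0 + 1) else cm) :=
      stepA_eq u _
    have hfu : cm.contains u = false := hfresh u (List.mem_cons_self ..)
    have hg0 : cm.getD u 0 = 0 := by rw [PySem.Dict.getD_of_not_contains]; simpa using hfu
    simp only [List.foldl_cons, hstep, foldInc]
    by_cases hc : r.countP (fun i => matchesA s u d i) = 0
    · rw [if_pos hc]
      rw [ih cm (by simp_all [List.nodup_cons]) (fun v hv => hfresh v (List.mem_cons_of_mem _ hv))]
      rw [List.filterMap_cons_none (by rw [if_pos hc])]
    · rw [if_neg hc, hg0]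
      have hitems := PySem.Dict.items_insert_of_not_contains (d := cm) (k := u)
        (v := (0 + (r.countP (fun i => matchesA s u d i) : Int))) (by simpa using hfu)
      rw [ih _ (by simp_all [List.nodup_cons]) ?_]
      · rw [hitems]
        rw [List.filterMap_cons_some (by rw [if_neg hc])]
        simp
      · intro v hv
        rw [PySem.Dict.contains_insert]
        have : v ≠ u := by rintro rfl; exact (List.nodup_cons.mp hnd).1 hv
        simp [this, hfresh v (List.mem_cons_of_mem _ hv)]
theorem count_map_cons_cons (c x : Char) (v : List Char) (l : List (List Char)) :
    (l.map (c :: ·)).count (x :: v) = if x = c then l.count v else 0 := by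
  by_cases h : x = c
  · subst h
    rw [if_pos rfl]
    exact List.count_map_of_injective l _ (fun a b hab => by simpa using hab) v
  · rw [if_neg h]
    rw [List.count_eq_zero]
    intro hm
    rcases List.mem_map.mp hm with ⟨w, _, hw⟩
    exact h ((List.cons.injEq c w x v).mp hw).1.symm

theorem count_map_cons_nil (c : Char) (l : List (List Char)) :
    (l.map (c :: ·)).count [] = 0 := by
  rw [List.count_eq_zero]
  intro hm
  rcases List.mem_map.mp hm with ⟨w, _, hw⟩
  exact List.cons_ne_nil _ _ hw

theorem count_neighborsB (t : List Char) : ∀ (d : Int) (u : List Char),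
    (neighborsB t d).count u
      = if u.length = t.length ∧ (∀ c ∈ u, c = 'A' ∨ c = 'C' ∨ c = 'G' ∨ c = 'T')
           ∧ ((mismN u t : Int) ≤ d) then 1 else 0 := by
  induction t with
  | nil =>
    intro d u
    rw [neighborsB]
    by_cases hd : d < 0
    · rw [if_pos hd]
      have hneg : ¬ (u.length = ([] : List Char).length ∧ (∀ c ∈ u, c = 'A' ∨ c = 'C' ∨ c = 'G' ∨ c = 'T')
           ∧ ((mismN u [] : Int) ≤ d)) := by
        rintro ⟨h1, h2, h3⟩
        simp [mismN] at h3
        omega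
      simp only [List.count_nil, hneg, if_false]
    · rw [if_neg hd]
      match u with
      | [] => simp [mismN]; omega
      | x :: v => simp [mismN, List.count_cons]
      -- PLACEHOLDER
  | cons c0 rest ih =>
    intro d u
    rw [neighborsB]
    by_cases hd : d < 0
    · rw [if_pos hd]
      have : ¬ (u.length = (c0 :: rest).length ∧ (∀ c ∈ u, c = 'A' ∨ c = 'C' ∨ c = 'G' ∨ c = 'T')
           ∧ ((mismN u (c0 :: rest) : Int) ≤ d)) := by
        rintro ⟨h1, h2, h3⟩
        have : (0:Int) ≤ (mismN u (c0 :: rest) : Int) := by positivity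
        omega
      simp only [List.count_nil, this, if_false]
    · rw [if_neg hd]
      match u with
      | [] =>
        simp only [List.map_cons, List.map_nil, List.flatten_cons, List.flatten_nil,
          List.count_append, count_map_cons_nil, List.count_nil]
        simp
      | x :: v =>
        simp only [List.map_cons, List.map_nil, List.flatten_cons, List.flatten_nil,
          List.count_append, List.append_nil, count_map_cons_cons, List.count_nil]
        have hm : (mismN (x :: v) (c0 :: rest) : Int)
            = (if x = c0 then 0 else 1) + (mismN v rest : Int) := by
          simp only [mismN, List.zip_cons_cons, List.countP_cons]
          by_cases hx : x = c0 <;> simp [hx] <;> push_cast <;> ring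
        have key : ∀ c : Char, (if x = c then (neighborsB rest (d - (if c == c0 then 0 else 1))).count v else 0)
            = if x = c ∧ v.length = rest.length ∧ (∀ ch ∈ v, ch = 'A' ∨ ch = 'C' ∨ ch = 'G' ∨ ch = 'T')
                 ∧ ((mismN v rest : Int) ≤ d - (if x = c0 then 0 else 1)) then 1 else 0 := by
          intro c
          by_cases hx : x = c
          · subst hx
            rw [if_pos rfl, ih]
            by_cases hcond : (v.length = rest.length ∧ (∀ ch ∈ v, ch = 'A' ∨ ch = 'C' ∨ ch = 'G' ∨ ch = 'T')
                 ∧ ((mismN v rest : Int) ≤ d - (if x = c0 then 0 else 1)))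
            · rw [if_pos (by simpa using hcond), if_pos (by exact ⟨rfl, hcond⟩)]
            · rw [if_neg (by simpa using hcond), if_neg (by rintro ⟨_, h⟩; exact hcond h)]
          · rw [if_neg hx, if_neg (by rintro ⟨h, _⟩; exact hx h)]
        rw [key 'A', key 'C', key 'G', key 'T']
        by_cases hx : x = 'A' ∨ x = 'C' ∨ x = 'G' ∨ x = 'T'
        · have hcond_iff : ((x :: v).length = (c0 :: rest).length
              ∧ (∀ c ∈ x :: v, c = 'A' ∨ c = 'C' ∨ c = 'G' ∨ c = 'T')
              ∧ ((mismN (x :: v) (c0 :: rest) : Int) ≤ d))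
            ↔ (v.length = rest.length ∧ (∀ ch ∈ v, ch = 'A' ∨ ch = 'C' ∨ ch = 'G' ∨ ch = 'T')
                 ∧ ((mismN v rest : Int) ≤ d - (if x = c0 then 0 else 1))) := by
            constructor
            · rintro ⟨h1, h2, h3⟩
              refine ⟨by simpa using h1, fun ch hch => h2 ch (List.mem_cons_of_mem _ hch), ?_⟩
              rw [hm] at h3; omega
            · rintro ⟨h1, h2, h3⟩
              refine ⟨by simpa using h1, ?_, by rw [hm]; omega⟩
              intro ch hch
              rcases List.mem_cons.mp hch with rfl | hch
              · exact hx
              · exact h2 ch hch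
          simp only [hcond_iff]
          rcases hx with rfl | rfl | rfl | rfl <;> simp
        · push_neg at hx
          rw [if_neg (by rintro ⟨h, -⟩; exact hx.1 h),
            if_neg (by rintro ⟨h, -⟩; exact hx.2.1 h),
            if_neg (by rintro ⟨h, -⟩; exact hx.2.2.1 h),
            if_neg (by rintro ⟨h, -⟩; exact hx.2.2.2 h),
            if_neg (by
              rintro ⟨-, h2, -⟩
              rcases h2 x (List.mem_cons_self ..) with h | h | h | h
              exacts [hx.1 h, hx.2.1 h, hx.2.2.1 h, hx.2.2.2 h])]
def rng (s : List Char) (k : Int) : List Int :=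
  PySem.List.pyRange 0 ((s.length : Int) - k + 1) 1

def winT (s : List Char) (k i : Int) : List Char :=
  PySem.List.slice s (some i) (some (i + k))

theorem mism_swap (u t : List Char) :
    (t.zip u).countP (fun p => p.1 != p.2) = mismN u t := by
  rw [mismN, ← List.zip_swap u t, List.countP_map]
  apply List.countP_congr
  intro p _
  simp [Function.comp, bne, BEq.beq]
  constructor <;> (intro h; intro he; exact h he.symm)

theorem len_winT (s : List Char) (k i : Int) (hk : 0 ≤ k) (hi : i ∈ rng s k) :
    (winT s k i).length = k.toNat := by
  rw [rng, PySem.List.mem_pyRange_one] at hi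
  rw [winT, PySem.List.slice_toNat s hi.1 (by omega)]
  simp only [List.length_take, List.length_drop]
  omega

theorem count_win (s : List Char) (k d i : Int) (hk : 0 ≤ k) (hi : i ∈ rng s k)
    (u : List Char) (hl : u.length = k.toNat)
    (hACGT : ∀ c ∈ u, c = 'A' ∨ c = 'C' ∨ c = 'G' ∨ c = 'T') :
    ((neighborsB (winT s k i) d).count u : Int) = if matchesA s u d i then 1 else 0 := by
  rw [count_neighborsB]
  have hlen : u.length = (winT s k i).length := by rw [len_winT s k i hk hi, hl]
  have hmA : matchesA s u d i = decide ((mismN u (winT s k i) : Int) ≤ d) := by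
    rw [matchesA]
    have : (u.length : Int) = k := by omega
    rw [this, ← winT, mism_swap]
  by_cases hm : (mismN u (winT s k i) : Int) ≤ d
  · rw [if_pos ⟨hlen, hACGT, hm⟩, hmA, if_pos (by simpa using hm)]
    simp
  · rw [if_neg (by rintro ⟨-, -, h⟩; exact hm h), hmA, if_neg (by simpa using hm)]
    simp

theorem mem_neighborsB (t : List Char) (d : Int) (u : List Char) :
    u ∈ neighborsB t d ↔ (u.length = t.length ∧ (∀ c ∈ u, c = 'A' ∨ c = 'C' ∨ c = 'G' ∨ c = 'T')
      ∧ ((mismN u t : Int) ≤ d)) := by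
  rw [← List.count_pos_iff, count_neighborsB]
  split_ifs with h
  · simpa using h
  · simpa using h

theorem countsB_getD (N : Int → List (List Char)) (r : List Int) :
    ∀ (cm : PySem.Dict (List Char) Int) (u : List Char),
    (r.foldl (fun cm i => (N i).foldl (fun cm u => cm.insert u (cm.getD u 0 + 1)) cm) cm).getD u 0
      = cm.getD u 0 + (r.map (fun i => ((N i).count u : Int))).sum := by
  induction r with
  | nil => intro cm u; simp
  | cons i r ih =>
    intro cm u
    rw [List.foldl_cons, ih, PySem.Dict.getD_foldl_insert_add_one]
    simp only [List.map_cons, List.sum_cons]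
    ring

theorem keysB (N : Int → List (List Char)) (r : List Int) :
    ∀ (cm : PySem.Dict (List Char) Int),
    (∀ u, u ∈ (r.foldl (fun cm i => (N i).foldl (fun cm u => cm.insert u (cm.getD u 0 + 1)) cm) cm).keys
      ↔ u ∈ cm.keys ∨ ∃ i ∈ r, u ∈ N i)
    ∧ (cm.keys.Nodup →
      (r.foldl (fun cm i => (N i).foldl (fun cm u => cm.insert u (cm.getD u 0 + 1)) cm) cm).keys.Nodup) := by
  induction r with
  | nil => intro cm; simp
  | cons i r ih =>
    intro cm
    constructor
    · intro u
      rw [List.foldl_cons, (ih _).1 u, PySem.Dict.keys_foldl_insert, PySem.Set.mem_update]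
      simp only [List.mem_cons]
      constructor
      · rintro (⟨h | h⟩ | ⟨j, hj, hu⟩)
        · exact Or.inl h
        · exact Or.inr ⟨i, Or.inl rfl, h⟩
        · exact Or.inr ⟨j, Or.inr hj, hu⟩
      · rintro (h | ⟨j, (rfl | hj), hu⟩)
        · exact Or.inl (Or.inl h)
        · exact Or.inl (Or.inr hu)
        · exact Or.inr ⟨j, hj, hu⟩
    · intro hnd
      rw [List.foldl_cons]
      exact (ih _).2 (PySem.Dict.nodup_keys_foldl_insert _ _ _ hnd)

theorem mem_pyKmerList (n : Nat) : ∀ (u : List Char),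
    u ∈ pyKmerList n ↔ (u.length = n ∧ ∀ c ∈ u, c = 'A' ∨ c = 'C' ∨ c = 'G' ∨ c = 'T') := by
  induction n with
  | zero =>
    intro u
    rw [pyKmerList]
    constructor
    · rintro h; rcases List.mem_singleton.mp h with rfl; simp
    · rintro ⟨h, -⟩; rw [List.length_eq_zero_iff] at h; simp [h]
  | succ n ih =>
    intro u
    rw [pyKmerList]
    simp only [List.mem_flatten, List.mem_map]
    constructor
    · rintro ⟨l, ⟨c, hc, rfl⟩, hu⟩
      rcases List.mem_map.mp hu with ⟨t, ht, rfl⟩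
      rcases (ih t).mp ht with ⟨hlen, hchars⟩
      refine ⟨by simp [hlen], ?_⟩
      intro ch hch
      rcases List.mem_cons.mp hch with rfl | hch
      · simpa using hc
      · exact hchars ch hch
    · rintro ⟨hlen, hchars⟩
      match u with
      | c :: t =>
        refine ⟨(pyKmerList n).map (c :: ·), ⟨c, ?_, rfl⟩, List.mem_map.mpr ⟨t, (ih t).mpr ⟨by simpa using hlen, fun ch hch => hchars ch (List.mem_cons_of_mem _ hch)⟩, rfl⟩⟩
        have := hchars c (List.mem_cons_self ..)
        rcases this with rfl | rfl | rfl | rfl <;> simp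

theorem pairwise_lt_pyKmerList (n : Nat) : (pyKmerList n).Pairwise (· < ·) := by
  induction n with
  | zero => rw [pyKmerList]; simp
  | succ n ih =>
    rw [pyKmerList]
    rw [List.pairwise_flatten]
    constructor
    · intro l hl
      rcases List.mem_map.mp hl with ⟨c, -, rfl⟩
      rw [List.pairwise_map]
      exact ih.imp (fun h => List.cons_lt_cons_iff.mpr (Or.inr ⟨rfl, h⟩))
    · have key : ∀ (c c' : Char), c < c' →
          ∀ x ∈ (pyKmerList n).map (c :: ·), ∀ y ∈ (pyKmerList n).map (c' :: ·), x < y := by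
        intro c c' hcc x hx y hy
        rcases List.mem_map.mp hx with ⟨t, -, rfl⟩
        rcases List.mem_map.mp hy with ⟨t', -, rfl⟩
        exact List.cons_lt_cons_iff.mpr (Or.inl hcc)
      simp only [List.map_cons, List.map_nil]
      refine List.Pairwise.cons (fun l hl => ?_)
        (List.Pairwise.cons (fun l hl => ?_)
          (List.Pairwise.cons (fun l hl => ?_) (List.pairwise_singleton _ _))) <;>
        simp only [List.mem_cons, List.not_mem_nil, or_false, List.mem_singleton] at hl <;>
        [rcases hl with rfl | rfl | rfl; rcases hl with rfl | rfl; rcases hl with rfl] <;>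
        exact key _ _ (by decide)

theorem nodup_pyKmerList (n : Nat) : (pyKmerList n).Nodup :=
  (pairwise_lt_pyKmerList n).imp (fun h => ne_of_lt h)

theorem filterMap_if (c : List Char → Nat) (l : List (List Char)) :
    l.filterMap (fun u => if c u = 0 then none else some (u, (c u : Int)))
      = (l.filter (fun u => !(c u == 0))).map (fun u => (u, (c u : Int))) := by
  induction l with
  | nil => simp
  | cons u l ih =>
    by_cases h : c u = 0
    · simp [h, ih]
    · simp [h, ih]
theorem mem_N_iff (s : List Char) (k d i : Int) (hk : 0 ≤ k) (hi : i ∈ rng s k) (u : List Char) :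
    u ∈ neighborsB (winT s k i) d
      ↔ (u.length = k.toNat ∧ (∀ c ∈ u, c = 'A' ∨ c = 'C' ∨ c = 'G' ∨ c = 'T')
          ∧ matchesA s u d i = true) := by
  rw [mem_neighborsB, len_winT s k i hk hi]
  constructor
  · rintro ⟨h1, h2, h3⟩
    refine ⟨h1, h2, ?_⟩
    rw [matchesA]
    have hko : (u.length : Int) = k := by omega
    rw [hko, ← winT, mism_swap]
    simpa using h3
  · rintro ⟨h1, h2, h3⟩
    refine ⟨h1, h2, ?_⟩
    rw [matchesA] at h3
    have hko : (u.length : Int) = k := by omega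
    rw [hko, ← winT, mism_swap] at h3
    simpa using h3

theorem main_eq (s : String) (k : Int) (d : Int) (hk : 0 ≤ k) :
    matches_map s k d = matches_map_alt s k d := by
  simp only [matches_map, matches_map_alt, PySem.Str.len_eq]
  have hrng : PySem.List.pyRange 0 ((s.toList.length : Int) - k + 1) 1 = rng s.toList k := rfl
  rw [hrng]
  set c : List Char → Nat :=
    fun u => (rng s.toList k).countP (fun i => matchesA s.toList u d i) with hc
  -- A side
  rw [foldOuter s.toList d (rng s.toList k) (pyKmerList k.toNat) PySem.Dict.empty
    (nodup_pyKmerList _) (by intro u _; rw [PySem.Dict.contains_empty])]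
  have hempty : (PySem.Dict.empty : PySem.Dict (List Char) Int).items = [] := rfl
  rw [hempty, List.nil_append, filterMap_if c]
  -- B side
  have hwin : ∀ i, PySem.List.slice s.toList (some i) (some (i + k)) = winT s.toList k i :=
    fun i => rfl
  simp only [hwin]
  set N : Int → List (List Char) := fun i => neighborsB (winT s.toList k i) d with hN
  set counts := (rng s.toList k).foldl
    (fun cm i => (N i).foldl (fun cm u => cm.insert u (cm.getD u 0 + 1)) cm)
    (PySem.Dict.empty : PySem.Dict (List Char) Int) with hcounts
  have hkeysnd : counts.keys.Nodup := by
    rw [hcounts]; exact (keysB N (rng s.toList k) _).2 (by simp [PySem.Dict.keys_empty])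
  have hkeymem : ∀ u, u ∈ counts.keys ↔ (u ∈ pyKmerList k.toNat ∧ c u ≠ 0) := by
    intro u
    rw [hcounts, (keysB N (rng s.toList k) _).1 u]
    simp only [PySem.Dict.keys_empty, List.not_mem_nil, false_or]
    constructor
    · rintro ⟨i, hi, hu⟩
      rcases (mem_N_iff s.toList k d i hk hi u).mp hu with ⟨h1, h2, h3⟩
      refine ⟨(mem_pyKmerList _ u).mpr ⟨h1, h2⟩, ?_⟩
      have : 0 < c u := List.countP_pos_iff.mpr ⟨i, hi, h3⟩
      omega
    · rintro ⟨hu, hcu⟩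
      rcases (mem_pyKmerList _ u).mp hu with ⟨h1, h2⟩
      rcases List.countP_pos_iff.mp (by omega : 0 < c u) with ⟨i, hi, hmi⟩
      exact ⟨i, hi, (mem_N_iff s.toList k d i hk hi u).mpr ⟨h1, h2, hmi⟩⟩
  have hgetD : ∀ u, u ∈ pyKmerList k.toNat → counts.getD u 0 = (c u : Int) := by
    intro u hu
    rcases (mem_pyKmerList _ u).mp hu with ⟨h1, h2⟩
    rw [hcounts, countsB_getD N (rng s.toList k) _ u, PySem.Dict.getD_empty, zero_add]
    have : (rng s.toList k).map (fun i => ((N i).count u : Int))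
        = (rng s.toList k).map (fun i => if matchesA s.toList u d i then 1 else 0) := by
      apply List.map_congr_left
      intro i hi
      exact count_win s.toList k d i hk hi u h1 h2
    rw [this, PySem.List.sum_map_ite_one_zero]
  have hsorted : PySem.List.sorted counts.keys (fun u => u) false
      = (pyKmerList k.toNat).filter (fun u => !(c u == 0)) := by
    have hinst : (fun (a b : List Char) => a.decidableLT b)
        = (List.instLinearOrder.toDecidableLT : DecidableLT (List Char)) := by
      funext a b; exact Subsingleton.elim _ _
    rw [hinst]
    refine PySem.List.sorted_eq_of_perm_of_pairwise_lt _ _ (fun u : List Char => u) ?_ ?_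
    · rw [List.perm_ext_iff_of_nodup
        ((nodup_pyKmerList k.toNat).filter _) hkeysnd]
      intro u
      rw [List.mem_filter, hkeymem u]
      simp
    · exact (pairwise_lt_pyKmerList k.toNat).filter _
  rw [hsorted, List.map_map]
  apply List.map_congr_left
  intro u hu
  have humem : u ∈ pyKmerList k.toNat := List.mem_of_mem_filter hu
  simp only [Function.comp]
  rw [hgetD u humem]

-- ===== VERDICT (by name: the statement is the Claim_ definition above) =====
theorem matches_map_spec : Claim_equal_matches_map := by
  intro s k d _ hPre
  exact main_eq s k d hPre
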